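-- pv_equiv track=rewrite | github.com/kingssafy/til | will/homework/bingo.py | result
-- ===== SOURCE A (Python) =====
-- def result(boards):
--     bingo = 0
--     for board in boards:
--         if sum(board) == 0 : bingo+=1
--     rotate = [[row[idx] for row in boards] for idx in range(5)]
--
--     for board in rotate:
--         if sum(board) == 0 : bingo+=1
--     a = []
--     b = []
--     for x, y in zip(range(5), range(5)):
--         a.append(boards[x][y])
--     for x, y in zip(range(5), range(4,-1,-1)):
--         b.append(boards[x][y])
--     if sum(a) == 0:
--         bingo +=1
--     if sum(b) == 0:
--         bingo += 1
--     return bingo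
-- ===== SOURCE B (Python) =====
-- def result(boards):
--     # One fused pass over the rows accumulating column sums and both diagonals,
--     # instead of A's four separate traversals (rows, transposed copy, two diag lists).
--     col = [0, 0, 0, 0, 0]
--     d1 = 0
--     d2 = 0
--     count = 0
--     for i, row in enumerate(boards):
--         if sum(row) == 0:
--             count += 1
--         col = [c + v for c, v in zip(col, row)]
--         if i < 5:
--             d1 += row[i]
--             d2 += row[4 - i]
--     for c in col:
--         if c == 0:
--             count += 1
--     if d1 == 0:
--         count += 1
--     if d2 == 0:
--         count += 1
--     return count
-- ===== Notes on version B (the rewrite author's own statement) =====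
-- stated objective: alternative
-- what changed: Replaces A's four separate traversals (row loop, building a transposed copy, two diagonal index lists) with one fused pass over the rows that accumulates column sums and both diagonal sums while counting zero-sum rows, then counts zeros once.
import Mathlib
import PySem

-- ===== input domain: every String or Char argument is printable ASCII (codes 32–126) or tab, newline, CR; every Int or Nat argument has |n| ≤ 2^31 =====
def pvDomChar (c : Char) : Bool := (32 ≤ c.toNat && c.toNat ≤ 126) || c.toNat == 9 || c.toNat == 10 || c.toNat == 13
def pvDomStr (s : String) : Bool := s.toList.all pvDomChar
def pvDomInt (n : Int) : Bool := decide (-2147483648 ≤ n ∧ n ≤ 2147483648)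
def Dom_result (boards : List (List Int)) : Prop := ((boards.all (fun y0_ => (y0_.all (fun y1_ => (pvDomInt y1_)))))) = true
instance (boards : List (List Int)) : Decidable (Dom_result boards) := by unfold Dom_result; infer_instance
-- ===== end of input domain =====

-- B fuses A's four traversals into one pass over the rows (same asymptotic cost; different decomposition).

-- ===== PORT A =====
def result (boards : List (List Int)) : Int :=
  let bingo : Int := boards.foldl (fun b board => if board.sum = 0 then b + 1 else b) 0
  let rotate : List (List Int) :=
    (PySem.List.pyRange 0 5 1).map (fun idx => boards.map (fun row => PySem.List.pyGetD row idx 0))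
  let bingo := rotate.foldl (fun b board => if board.sum = 0 then b + 1 else b) bingo
  let a : List Int := ((PySem.List.pyRange 0 5 1).zip (PySem.List.pyRange 0 5 1)).map
    (fun p => PySem.List.pyGetD (PySem.List.pyGetD boards p.1 []) p.2 0)
  let b : List Int := ((PySem.List.pyRange 0 5 1).zip (PySem.List.pyRange 4 (-1) (-1))).map
    (fun p => PySem.List.pyGetD (PySem.List.pyGetD boards p.1 []) p.2 0)
  let bingo := if a.sum = 0 then bingo + 1 else bingo
  let bingo := if b.sum = 0 then bingo + 1 else bingo
  bingo

-- ===== PORT B =====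
-- the fused loop: state (count, col, d1, d2), i is the enumerate index
def bingoLoop : Nat → Int → List Int → Int → Int → List (List Int) → Int × List Int × Int × Int
  | _, zr, col, d1, d2, [] => (zr, col, d1, d2)
  | i, zr, col, d1, d2, row :: rest =>
      bingoLoop (i + 1)
        (if row.sum = 0 then zr + 1 else zr)
        ((col.zip row).map (fun p => p.1 + p.2))
        (if i < 5 then d1 + PySem.List.pyGetD row (i : Int) 0 else d1)
        (if i < 5 then d2 + PySem.List.pyGetD row (4 - (i : Int)) 0 else d2)
        rest

def result_alt (boards : List (List Int)) : Int :=
  let s := bingoLoop 0 0 [0, 0, 0, 0, 0] 0 0 boards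
  let count := s.1
  let count := s.2.1.foldl (fun c v => if v = 0 then c + 1 else c) count
  let count := if s.2.2.1 = 0 then count + 1 else count
  if s.2.2.2 = 0 then count + 1 else count

-- ===== PRECONDITION & SPEC =====
-- Pre: exactly the inputs where Python A returns (otherwise it raises IndexError
-- indexing a row shorter than 5 or a board with fewer than 5 rows).
def Pre_result (boards : List (List Int)) : Prop :=
  5 ≤ boards.length ∧ ∀ row ∈ boards, 5 ≤ row.length
instance (boards : List (List Int)) : Decidable (Pre_result boards) := by
  unfold Pre_result; infer_instance

def pvWitness_result : List (List Int) :=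
  [[1, -1, 0, 0, 0], [0, 0, 0, 0, 0], [2, 0, 0, 0, 0], [0, 3, 0, 0, 0], [0, 0, 0, 0, 1]]

def Spec_result (boards : List (List Int)) (out : Int) : Prop := out = result_alt boards
instance (boards : List (List Int)) (out : Int) : Decidable (Spec_result boards out) := by
  unfold Spec_result; infer_instance

-- ===== CLAIM (what is proved, stated in full; the proofs are below) =====
def Claim_equal_result : Prop :=
  ∀ (boards : List (List Int)), Dom_result boards → Pre_result boards →
    Spec_result boards (result boards)

-- ===== LEMMAS AND PROOFS =====

-- spec helpers used only by the proofs
def colj (j : Int) (bs : List (List Int)) : Int :=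
  (bs.map (fun r => PySem.List.pyGetD r j 0)).sum

def dsum1 : Nat → List (List Int) → Int
  | _, [] => 0
  | i, r :: rs => (if i < 5 then PySem.List.pyGetD r (i : Int) 0 else 0) + dsum1 (i + 1) rs

def dsum2 : Nat → List (List Int) → Int
  | _, [] => 0
  | i, r :: rs => (if i < 5 then PySem.List.pyGetD r (4 - (i : Int)) 0 else 0) + dsum2 (i + 1) rs

lemma dsum1_of_ge (bs : List (List Int)) : ∀ i, 5 ≤ i → dsum1 i bs = 0 := by
  induction bs with
  | nil => intro i _; rfl
  | cons r rs ih =>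
      intro i hi
      simp [dsum1, Nat.not_lt.mpr hi, ih (i + 1) (by omega)]

lemma dsum2_of_ge (bs : List (List Int)) : ∀ i, 5 ≤ i → dsum2 i bs = 0 := by
  induction bs with
  | nil => intro i _; rfl
  | cons r rs ih =>
      intro i hi
      simp [dsum2, Nat.not_lt.mpr hi, ih (i + 1) (by omega)]

lemma bingoLoop_spec (bs : List (List Int)) (h : ∀ r ∈ bs, 5 ≤ r.length) :
    ∀ (i : Nat) (zr c0 c1 c2 c3 c4 d1 d2 : Int),
    bingoLoop i zr [c0, c1, c2, c3, c4] d1 d2 bs =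
      (zr + (bs.countP (fun r => decide (r.sum = 0)) : Int),
       [c0 + colj 0 bs, c1 + colj 1 bs, c2 + colj 2 bs, c3 + colj 3 bs, c4 + colj 4 bs],
       d1 + dsum1 i bs, d2 + dsum2 i bs) := by
  induction bs with
  | nil => intro i zr c0 c1 c2 c3 c4 d1 d2; simp [bingoLoop, colj, dsum1, dsum2]
  | cons r rs ih =>
      intro i zr c0 c1 c2 c3 c4 d1 d2
      have hr : 5 ≤ r.length := h r (List.mem_cons_self ..)
      obtain ⟨a0, r, rfl⟩ : ∃ a0 t, r = a0 :: t := by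
        cases r with | nil => simp at hr | cons a t => exact ⟨a, t, rfl⟩
      obtain ⟨a1, r, rfl⟩ : ∃ a1 t, r = a1 :: t := by
        cases r with | nil => simp at hr | cons a t => exact ⟨a, t, rfl⟩
      obtain ⟨a2, r, rfl⟩ : ∃ a2 t, r = a2 :: t := by
        cases r with | nil => simp at hr | cons a t => exact ⟨a, t, rfl⟩
      obtain ⟨a3, r, rfl⟩ : ∃ a3 t, r = a3 :: t := by
        cases r with | nil => simp at hr | cons a t => exact ⟨a, t, rfl⟩
      obtain ⟨a4, r, rfl⟩ : ∃ a4 t, r = a4 :: t := by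
        cases r with | nil => simp at hr | cons a t => exact ⟨a, t, rfl⟩
      have ih' := ih (fun r hm => h r (List.mem_cons_of_mem _ hm))
      simp only [bingoLoop, List.zip, List.zipWith, List.map, ih', Prod.mk.injEq]
      refine ⟨?_, ?_, ?_, ?_⟩
      · simp [List.countP_cons]; split_ifs <;> omega
      · simp [colj, PySem.List.pyGetD, PySem.List.pyGet?, PySem.List.pyIdx?]
        refine ⟨by ring, by ring, by ring, by ring, by ring⟩
      · simp [dsum1]; split_ifs <;> ring
      · simp [dsum2]; split_ifs <;> ring

-- ===== VERDICT (by name: the statement is the Claim_ definition above) =====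
set_option maxHeartbeats 2000000 in
theorem result_spec : Claim_equal_result := by
  intro boards _ hpre
  obtain ⟨hlen, hrows⟩ := hpre
  obtain ⟨b0, b1, b2, b3, b4, t, rfl⟩ :
      ∃ b0 b1 b2 b3 b4 t, boards = b0 :: b1 :: b2 :: b3 :: b4 :: t := by
    match boards, hlen with
    | x0 :: x1 :: x2 :: x3 :: x4 :: t, _ => exact ⟨x0, x1, x2, x3, x4, t, rfl⟩
  have hr5 : PySem.List.pyRange 0 5 1 = [0, 1, 2, 3, 4] := by decide
  have hr4 : PySem.List.pyRange 4 (-1) (-1) = [4, 3, 2, 1, 0] := by decide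
  unfold Spec_result result result_alt
  rw [bingoLoop_spec _ hrows]
  simp only [hr5, hr4, dsum1, dsum2, colj, List.zip, List.zipWith, List.map,
    PySem.List.foldl_ite_add_one, List.foldl, List.sum_cons, List.sum_nil,
    PySem.List.pyGetD_ofNat', Nat.reduceAdd, Nat.cast_ofNat,
    Nat.cast_zero, Nat.cast_one, List.countP_cons, List.countP_nil]
  have hite : ∀ (c : Prop) [inst : Decidable c] (x : Int), (if c then x + 1 else x) = x + (if c then 1 else 0) := by
    intro c _ x; split <;> ring
  simp only [dsum1_of_ge t 5 le_rfl, dsum2_of_ge t 5 le_rfl, add_zero]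
  simp [PySem.List.pyGetD_ofNat', List.getD_eq_getElem?_getD]
  simp only [hite]
  ring
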